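-- pv_equiv track=rewrite | github.com/MATHIASCW/Semantic-Web-project | scripts/rdf/integrate_multilang_labels.py | normalize_label
-- ===== SOURCE A (Python) =====
-- def normalize_label(value: str) -> str:
--     text = (value or "").strip().lower()
--     text = text.replace("_", " ")
--     cleaned = []
--     for ch in text:
--         if ch.isalnum() or ch.isspace():
--             cleaned.append(ch)
--     text = "".join(cleaned)
--     return " ".join(text.split())
-- ===== SOURCE B (Python) =====
-- def normalize_label(value: str) -> str:
--     # One tokenizing pass: '_' and whitespace end the current word, alnum
--     # chars extend it, everything else is dropped without breaking the word.
--     words = []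
--     current = []
--     for ch in (value or "").lower():
--         if ch == "_" or ch.isspace():
--             if current:
--                 words.append("".join(current))
--                 current = []
--         elif ch.isalnum():
--             current.append(ch)
--     if current:
--         words.append("".join(current))
--     return " ".join(words)
-- ===== Notes on version B (the rewrite author's own statement) =====
-- stated objective: alternative
-- what changed: Replaces A's five-stage pipeline (strip, lower, underscore-to-space replace, filter, split+join) by a single tokenizing pass over the lowercased string that maintains a current word and a word list, flushing on underscore/whitespace and dropping other punctuation inline.
import Mathlib
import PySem

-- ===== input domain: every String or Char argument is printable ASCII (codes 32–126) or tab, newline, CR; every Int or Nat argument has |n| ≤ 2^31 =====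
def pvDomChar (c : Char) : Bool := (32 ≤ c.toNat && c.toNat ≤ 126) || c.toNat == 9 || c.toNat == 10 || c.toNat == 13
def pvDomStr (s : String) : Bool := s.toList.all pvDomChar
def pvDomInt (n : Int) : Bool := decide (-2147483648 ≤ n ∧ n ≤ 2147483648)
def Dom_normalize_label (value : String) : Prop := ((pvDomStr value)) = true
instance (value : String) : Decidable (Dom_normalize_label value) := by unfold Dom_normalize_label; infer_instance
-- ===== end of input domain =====

-- B replaces A's five-stage pipeline (strip, lower, replace, filter, split/join)
-- by one tokenizing pass over the lowercased string (objective: alternative).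

-- ===== PORT A =====
-- `(value or "")` is the identity on a str argument (a falsy str IS ""), ported as `value`.
def normalize_label (value : String) : String :=
  let text1 := PySem.Str.lower (PySem.Str.strip value)
  let text2 := PySem.Str.replace text1 "_" " "
  let cleaned := text2.toList.foldl
    (fun acc ch => if PySem.Chars.isalnum ch || PySem.Chars.isspace ch then acc ++ [ch] else acc)
    ([] : List Char)
  let text3 := String.ofList cleaned       -- "".join(cleaned) over single chars
  PySem.Str.join " " (PySem.Str.split₀ text3)

-- ===== PORT B =====
-- loop body of Source B: state = (words, current); '_'/space flushes, alnum extends, else skip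
def pvStepB (st : List (List Char) × List Char) (ch : Char) : List (List Char) × List Char :=
  if ch == '_' || PySem.Chars.isspace ch then
    (if st.2.isEmpty then st.1 else st.1 ++ [st.2], [])
  else if PySem.Chars.isalnum ch then (st.1, st.2 ++ [ch])
  else st

def normalize_label_alt (value : String) : String :=
  let st := (PySem.Str.lower value).toList.foldl pvStepB ([], [])
  let words := if st.2.isEmpty then st.1 else st.1 ++ [st.2]
  PySem.Str.join " " (words.map String.ofList)

-- ===== PRECONDITION & SPEC =====
def Spec_normalize_label (value : String) (out : String) : Prop := out = normalize_label_alt value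
instance (value : String) (out : String) : Decidable (Spec_normalize_label value out) := by unfold Spec_normalize_label; infer_instance

-- ===== CLAIM (what is proved, stated in full; the proofs are below) =====
def Claim_equal_normalize_label : Prop := ∀ (value : String), Dom_normalize_label value → Spec_normalize_label value (normalize_label value)

-- ===== LEMMAS AND PROOFS =====

-- separator under B's tokenizer; kept characters of A's filter; A's '_'→' ' replacement, per char
def sepc (c : Char) : Bool := c == '_' || PySem.Chars.isspace c
def keepc (c : Char) : Bool := sepc c || PySem.Chars.isalnum c
def rmap (c : Char) : Char := if c == '_' then ' ' else c

-- common tokenizer both ports are reduced to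
def tokGo : List Char → List Char → List (List Char) → List (List Char)
  | [], cur, acc => if cur.isEmpty then acc.reverse else (cur.reverse :: acc).reverse
  | c :: rest, cur, acc =>
    if sepc c then
      if cur.isEmpty then tokGo rest [] acc else tokGo rest [] (cur.reverse :: acc)
    else if PySem.Chars.isalnum c then tokGo rest (c :: cur) acc
    else tokGo rest cur acc

-- --- character-level facts about lowerChar ---
lemma char_le_toNat (a b : Char) : (a ≤ b) ↔ a.toNat ≤ b.toNat := Iff.rfl

lemma upper_bounds {c : Char} (h : PySem.Chars.isupper c = true) : 65 ≤ c.toNat ∧ c.toNat ≤ 90 := by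
  simp [PySem.Chars.isupper, char_le_toNat] at h
  exact h

lemma valid32 {c : Char} (h : PySem.Chars.isupper c = true) : (c.toNat + 32).isValidChar := by
  obtain ⟨h1, h2⟩ := upper_bounds h; left; omega

lemma lc_isspace (c : Char) : PySem.Chars.isspace (PySem.Chars.lowerChar c) = PySem.Chars.isspace c := by
  unfold PySem.Chars.lowerChar
  split_ifs with h
  · obtain ⟨h1, h2⟩ := upper_bounds h
    have hA : PySem.Chars.isspace (Char.ofNat (c.toNat + 32)) = false := by
      simp [PySem.Chars.isspace, Char.toNat_ofNat, valid32 h]; omega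
    have hB : PySem.Chars.isspace c = false := by
      simp [PySem.Chars.isspace]; omega
    rw [hA, hB]
  · rfl

-- --- A's replace("_", " ") is the per-character map rmap ---
lemma replace_go_us : ∀ (l acc : List Char) (fuel : Nat), l.length ≤ fuel →
    PySem.Chars.replace.go ['_'] [' '] fuel l acc = acc.reverse ++ l.map rmap := by
  intro l
  induction l with
  | nil =>
    intro acc fuel _
    cases fuel <;> simp [PySem.Chars.replace.go]
  | cons c t ih =>
    intro acc fuel hf
    cases fuel with
    | zero => simp at hf
    | succ fuel =>
      rw [PySem.Chars.replace.go.eq_def]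
      simp only [List.isPrefixOf, Bool.and_true]
      by_cases hc : c = '_'
      · subst hc
        rw [if_pos (by simp)]
        have ht : t.length ≤ fuel := by simp at hf; omega
        simp [ih _ fuel ht, rmap]
      · rw [if_neg (by simp [beq_iff_eq]; exact fun h => hc h.symm)]
        rw [ih _ fuel (by simp at hf; omega)]
        simp [rmap, hc]

lemma replace_us (cs : List Char) : PySem.Chars.replace cs ['_'] [' '] = cs.map rmap := by
  unfold PySem.Chars.replace
  simp only [List.isEmpty_iff, reduceCtorEq, if_false]
  exact replace_go_us cs [] cs.length le_rfl

-- --- A's filter predicate composed with rmap is keepc ---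
lemma q_rmap (c : Char) :
    (PySem.Chars.isalnum (rmap c) || PySem.Chars.isspace (rmap c)) = keepc c := by
  by_cases h : c = '_'
  · subst h; decide
  · simp [rmap, h, keepc, sepc]
    cases PySem.Chars.isalnum c <;> cases PySem.Chars.isspace c <;> simp [h]

-- --- split₀ of the filtered, replaced list is the tokenizer ---
lemma split0_go_tok : ∀ (l cur : List Char) (acc : List (List Char)),
    PySem.Chars.split₀.go ((l.filter keepc).map rmap) cur acc = tokGo l cur acc := by
  intro l
  induction l with
  | nil => intro cur acc; rfl
  | cons c rest ih =>
    intro cur acc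
    by_cases hk : keepc c
    · rw [List.filter_cons_of_pos hk, List.map_cons, PySem.Chars.split₀.go.eq_def]
      by_cases hu : c = '_'
      · subst hu
        have h1 : rmap '_' = ' ' := rfl
        have h2 : PySem.Chars.isspace ' ' = true := by decide
        have h3 : sepc '_' = true := by decide
        simp [h1, h2, tokGo, h3, ih]
      · have hr : rmap c = c := by simp [rmap, hu]
        by_cases hs : PySem.Chars.isspace c
        · have hsc : sepc c = true := by simp [sepc, hs]
          simp [hr, hs, tokGo, hsc, ih]
        · have hsc : sepc c = false := by simp [sepc, hs, hu]
          have ha : PySem.Chars.isalnum c = true := by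
            simp [keepc, hsc] at hk; exact hk
          simp [hr, hs, tokGo, hsc, ha, ih]
    · rw [List.filter_cons_of_neg hk]
      have h1 : sepc c = false := by
        simp [keepc] at hk; simp [hk.1]
      have h2 : PySem.Chars.isalnum c = false := by
        simp [keepc] at hk; simp [hk.2]
      simp [tokGo, h1, h2, ih]

-- --- B's fold with final flush is the tokenizer ---
lemma foldl_stepB : ∀ (l : List Char) (ws : List (List Char)) (cur : List Char),
    (if (l.foldl pvStepB (ws, cur)).2.isEmpty then (l.foldl pvStepB (ws, cur)).1
     else (l.foldl pvStepB (ws, cur)).1 ++ [(l.foldl pvStepB (ws, cur)).2])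
      = tokGo l cur.reverse ws.reverse := by
  intro l
  induction l with
  | nil =>
    intro ws cur
    simp only [List.foldl_nil, tokGo, List.isEmpty_reverse, List.reverse_reverse]
    split_ifs <;> simp
  | cons c rest ih =>
    intro ws cur
    rw [List.foldl_cons]
    by_cases hsep : sepc c
    · have hb : (c == '_' || PySem.Chars.isspace c) = true := hsep
      by_cases hc : cur.isEmpty
      · have hc' : cur = [] := List.isEmpty_iff.mp hc
        subst hc'
        rw [show pvStepB (ws, []) c = (ws, []) from by simp [pvStepB, hb], ih]
        simp [tokGo, hsep]
      · rw [show pvStepB (ws, cur) c = (ws ++ [cur], []) from by simp [pvStepB, hb, hc], ih]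
        simp [tokGo, hsep, hc]
    · have hb : (c == '_' || PySem.Chars.isspace c) = false := by
        simp [sepc] at hsep; simp [hsep.1, hsep.2]
      by_cases ha : PySem.Chars.isalnum c
      · rw [show pvStepB (ws, cur) c = (ws, cur ++ [c]) from by simp [pvStepB, hb, ha], ih]
        simp [tokGo, hsep, ha]
      · rw [show pvStepB (ws, cur) c = (ws, cur) from by simp [pvStepB, hb, ha], ih]
        simp [tokGo, hsep, ha]

-- --- the tokenizer ignores A's strip ---
lemma tokGo_spaces : ∀ (ss : List Char), (∀ c ∈ ss, PySem.Chars.isspace c = true) →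
    ∀ (cur : List Char) (acc : List (List Char)), tokGo ss cur acc = tokGo [] cur acc := by
  intro ss
  induction ss with
  | nil => intro _ _ _; rfl
  | cons c t ih =>
    intro h cur acc
    have hs : sepc c = true := by simp [sepc, h c (by simp)]
    have ht : ∀ d ∈ t, PySem.Chars.isspace d = true := fun d hd => h d (by simp [hd])
    by_cases hc : cur.isEmpty
    · have hc' : cur = [] := List.isEmpty_iff.mp hc
      subst hc'
      simp [tokGo, hs, ih ht]
    · simp [tokGo, hs, hc, ih ht]

lemma tokGo_append_spaces : ∀ (es ss : List Char), (∀ c ∈ ss, PySem.Chars.isspace c = true) →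
    ∀ (cur : List Char) (acc : List (List Char)), tokGo (es ++ ss) cur acc = tokGo es cur acc := by
  intro es
  induction es with
  | nil =>
    intro ss h cur acc
    simpa using tokGo_spaces ss h cur acc
  | cons c t ih =>
    intro ss h cur acc
    simp only [List.cons_append, tokGo]
    split_ifs <;> rw [ih ss h]

lemma tokGo_rstrip (es : List Char) (cur : List Char) (acc : List (List Char)) :
    tokGo (PySem.Chars.rstrip es) cur acc = tokGo es cur acc := by
  have hdecomp : es = PySem.Chars.rstrip es ++ (List.takeWhile PySem.Chars.isspace es.reverse).reverse := by
    unfold PySem.Chars.rstrip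
    rw [← List.reverse_append, List.takeWhile_append_dropWhile, List.reverse_reverse]
  conv_rhs => rw [hdecomp]
  rw [tokGo_append_spaces]
  intro c hc
  exact List.mem_takeWhile_imp (List.mem_reverse.mp hc)

lemma tokGo_lstrip : ∀ (es : List Char) (acc : List (List Char)),
    tokGo (PySem.Chars.lstrip es) [] acc = tokGo es [] acc := by
  intro es
  induction es with
  | nil => intro _; rfl
  | cons c t ih =>
    intro acc
    unfold PySem.Chars.lstrip at *
    by_cases hs : PySem.Chars.isspace c
    · rw [List.dropWhile_cons_of_pos hs, ih]
      have hsc : sepc c = true := by simp [sepc, hs]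
      simp [tokGo, hsc]
    · rw [List.dropWhile_cons_of_neg (by simp [hs])]

-- --- lower commutes with strip ---
lemma lower_strip (cs : List Char) :
    PySem.Chars.lower (PySem.Chars.strip cs) = PySem.Chars.strip (PySem.Chars.lower cs) := by
  have hps : (PySem.Chars.isspace ∘ PySem.Chars.lowerChar) = PySem.Chars.isspace :=
    funext lc_isspace
  unfold PySem.Chars.strip PySem.Chars.rstrip PySem.Chars.lstrip PySem.Chars.lower
  rw [List.dropWhile_map, hps, ← List.map_reverse, List.dropWhile_map, hps, List.map_reverse]

lemma tokGo_strip (cs : List Char) :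
    tokGo (PySem.Chars.lower (PySem.Chars.strip cs)) [] [] = tokGo (PySem.Chars.lower cs) [] [] := by
  rw [lower_strip]
  unfold PySem.Chars.strip
  rw [tokGo_rstrip, tokGo_lstrip]

-- ===== VERDICT (by name: the statement is the Claim_ definition above) =====
theorem normalize_label_spec : Claim_equal_normalize_label := by
  intro value _
  unfold Spec_normalize_label normalize_label normalize_label_alt
  apply String.toList_inj.mp
  rw [PySem.Str.toList_join, PySem.Str.toList_join, PySem.Str.split₀_map_toList]
  refine congrArg (PySem.Chars.join (String.toList " ")) ?_
  rw [String.toList_ofList, PySem.List.foldl_append_if_eq_filter, List.nil_append,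
    PySem.Str.toList_replace, PySem.Str.toList_lower, PySem.Str.toList_strip]
  have h1 : ("_" : String).toList = ['_'] := rfl
  have h2 : (" " : String).toList = [' '] := rfl
  rw [h1, h2, replace_us, List.filter_map]
  have h3 : ((fun ch => PySem.Chars.isalnum ch || PySem.Chars.isspace ch) ∘ rmap) = keepc :=
    funext fun c => q_rmap c
  rw [h3]
  have hsplit : ∀ (X : List Char), PySem.Chars.split₀ X = PySem.Chars.split₀.go X [] [] :=
    fun _ => rfl
  rw [hsplit, split0_go_tok, tokGo_strip]
  rw [List.map_map]
  have h4 : (String.toList ∘ String.ofList) = id := funext fun l => String.toList_ofList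
  rw [h4, List.map_id, PySem.Str.toList_lower]
  have h5 := foldl_stepB (PySem.Chars.lower value.toList) [] []
  simpa using h5.symm
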